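-- pv_equiv track=rewrite | github.com/racrigler44/Rummikub | play.py | find_initial_groups_from_hand
-- ===== SOURCE A (Python) =====
-- from itertools import combinations
--
-- def is_valid_group(group):
--     if len(group) < 3:
--         return False
--     colors = [color for color, _ in group]
--     numbers = [num for _, num in group]
--     # Set (same number, different colors)
--     if len(set(numbers)) == 1 and len(set(colors)) == len(group):
--         return True
--     # Run (same color, consecutive numbers)
--     if len(set(colors)) == 1:
--         sorted_nums = sorted(numbers)
--         return all(sorted_nums[i] + 1 == sorted_nums[i + 1] for i in range(len(sorted_nums) - 1))
--     return False
--
-- def find_initial_groups_from_hand(hand):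
--     groups = []
--     used_tiles = set()
--     for size in range(3, len(hand) + 1):
--         for combo in combinations(hand, size):
--             if any(tile in used_tiles for tile in combo):
--                 continue
--             if is_valid_group(combo):
--                 groups.append(list(combo))
--                 used_tiles.update(combo)
--     remaining_hand = [tile for tile in hand if tile not in used_tiles]
--     return groups, remaining_hand
-- ===== SOURCE B (Python) =====
-- def _is_valid_group(group):
--     if len(group) < 3:
--         return False
--     colors = [color for color, _ in group]
--     numbers = [num for _, num in group]
--     # Set (same number, different colors)
--     if len(set(numbers)) == 1 and len(set(colors)) == len(group):
--         return True
--     # Run (same color, consecutive numbers)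
--     if len(set(colors)) == 1:
--         sorted_nums = sorted(numbers)
--         return all(sorted_nums[i] + 1 == sorted_nums[i + 1] for i in range(len(sorted_nums) - 1))
--     return False
--
--
-- def _extendable(g):
--     # a valid group has all-equal numbers (set) or all-equal colors (run) and
--     # pairwise-distinct tiles, and so does every subsequence of one: anything
--     # else cannot grow into a valid group
--     return (all(num == g[0][1] for _, num in g)
--             or all(color == g[0][0] for color, _ in g)) and len(set(g)) == len(g)
--
--
-- def find_initial_groups_from_hand(hand):
--     n = len(hand)
--     # Collect every valid group (index-subsequence of hand) by a pruned DFS,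
--     # in depth-first (lexicographic index) order, instead of enumerating all
--     # 2^n combinations.
--     cands = []
--
--     def dfs(start, cur):
--         for i in range(start, n):
--             cur.append(hand[i])
--             if _is_valid_group(cur):
--                 cands.append(list(cur))
--             if _extendable(cur):
--                 dfs(i + 1, cur)
--             cur.pop()
--
--     dfs(0, [])
--     # Greedy selection in A's order: sizes ascending, lexicographic within a size.
--     groups = []
--     used = set()
--     for size in range(3, n + 1):
--         for g in cands:
--             if len(g) == size and all(t not in used for t in g):
--                 groups.append(g)
--                 used.update(g)
--     remaining = [t for t in hand if t not in used]
--     return groups, remaining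
-- ===== Notes on version B (the rewrite author's own statement) =====
-- stated objective: faster
-- what changed: Instead of enumerating all 2^n combinations of the hand per size, B collects the valid groups once by a depth-first subsequence search that prunes any partial group whose tiles are neither all-equal in number nor all-equal in color (no valid group can extend it), then runs the same size-ascending greedy selection over that candidate list.
import Mathlib
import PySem

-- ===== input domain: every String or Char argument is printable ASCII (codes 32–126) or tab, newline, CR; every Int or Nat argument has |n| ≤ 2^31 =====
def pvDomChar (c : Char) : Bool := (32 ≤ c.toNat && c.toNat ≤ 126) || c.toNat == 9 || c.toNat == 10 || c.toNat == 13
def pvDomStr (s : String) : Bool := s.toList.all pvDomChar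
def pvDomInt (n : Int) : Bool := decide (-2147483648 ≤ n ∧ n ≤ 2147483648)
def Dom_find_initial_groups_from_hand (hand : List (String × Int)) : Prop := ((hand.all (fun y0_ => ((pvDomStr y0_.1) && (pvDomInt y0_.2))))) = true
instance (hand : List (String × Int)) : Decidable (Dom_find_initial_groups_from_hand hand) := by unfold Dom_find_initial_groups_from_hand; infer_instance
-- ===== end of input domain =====

-- B replaces A's enumeration of all 2^n combinations by a pruned depth-first
-- search that collects only the candidate groups, then the same greedy selection.

-- ===== PORT A =====
-- shared helper: transliteration of is_valid_group (Source A and Source B carry this identical helper)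
def pvValid (group : List (String × Int)) : Bool :=
  if group.length < 3 then false
  else
    let colors := group.map (·.1)
    let numbers := group.map (·.2)
    if (PySem.Set.ofList numbers).length == 1 && (PySem.Set.ofList colors).length == group.length then
      true
    else if (PySem.Set.ofList colors).length == 1 then
      let sorted_nums := PySem.List.sorted numbers (fun x => x) false
      (PySem.List.pyRange 0 ((sorted_nums.length : Int) - 1) 1).all (fun i =>
        PySem.List.pyGetD sorted_nums i 0 + 1 == PySem.List.pyGetD sorted_nums (i + 1) 0)
    else false

-- itertools.combinations(l, k): the k-subsequences in lexicographic index order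
def pvComb : Nat → List (String × Int) → List (List (String × Int))
  | 0, _ => [[]]
  | _ + 1, [] => []
  | k + 1, x :: xs => (pvComb k xs).map (x :: ·) ++ pvComb (k + 1) xs

-- the nested 'for size … for combo …' loop of A, over the state (groups, used_tiles)
def pvLoopA (hand : List (String × Int)) :
    List (List (String × Int)) × PySem.Set (String × Int) :=
  (PySem.List.pyRange 3 ((hand.length : Int) + 1) 1).foldl
    (fun st size =>
      (pvComb size.toNat hand).foldl
        (fun st combo =>
          if combo.any (fun t => PySem.Set.contains st.2 t) then st
          else if pvValid combo then (st.1 ++ [combo], PySem.Set.update st.2 combo)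
          else st) st)
    ([], PySem.Set.empty)

def find_initial_groups_from_hand (hand : List (String × Int)) :
    (List (List (String × Int))) × (List (String × Int)) :=
  ((pvLoopA hand).1, hand.filter (fun t => !(PySem.Set.contains (pvLoopA hand).2 t)))

-- ===== PORT B =====
def pvExtendable (g : List (String × Int)) : Bool :=
  (match g with
   | [] => true
   | (c0, n0) :: _ => g.all (fun t => t.2 == n0) || g.all (fun t => t.1 == c0)) &&
  ((PySem.Set.ofList g).length == g.length)

-- the dfs of Source B: emit cur++[x] if valid, recurse unless pruned, continue the loop
def pvDfs (cur : List (String × Int)) : List (String × Int) → List (List (String × Int))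
  | [] => []
  | x :: xs =>
    (if pvValid (cur ++ [x]) then [cur ++ [x]] else []) ++
    (if pvExtendable (cur ++ [x]) then pvDfs (cur ++ [x]) xs else []) ++
    pvDfs cur xs

-- the greedy selection loop of Source B over the collected candidates
def pvLoopB (hand : List (String × Int)) :
    List (List (String × Int)) × PySem.Set (String × Int) :=
  (PySem.List.pyRange 3 ((hand.length : Int) + 1) 1).foldl
    (fun st size =>
      (pvDfs [] hand).foldl
        (fun st g =>
          if ((g.length : Int) == size) && g.all (fun t => !(PySem.Set.contains st.2 t)) then
            (st.1 ++ [g], PySem.Set.update st.2 g)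
          else st) st)
    ([], PySem.Set.empty)

def find_initial_groups_from_hand_alt (hand : List (String × Int)) :
    (List (List (String × Int))) × (List (String × Int)) :=
  ((pvLoopB hand).1, hand.filter (fun t => !(PySem.Set.contains (pvLoopB hand).2 t)))

-- ===== PRECONDITION & SPEC =====
def Spec_find_initial_groups_from_hand (hand : List (String × Int)) (out : (List (List (String × Int))) × (List (String × Int))) : Prop := out = find_initial_groups_from_hand_alt hand
instance (hand : List (String × Int)) (out : (List (List (String × Int))) × (List (String × Int))) : Decidable (Spec_find_initial_groups_from_hand hand out) := by unfold Spec_find_initial_groups_from_hand; infer_instance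

-- ===== CLAIM (what is proved, stated in full; the proofs are below) =====
def Claim_equal_find_initial_groups_from_hand : Prop := ∀ (hand : List (String × Int)), Dom_find_initial_groups_from_hand hand → Spec_find_initial_groups_from_hand hand (find_initial_groups_from_hand hand)

-- ===== LEMMAS AND PROOFS =====

-- all nonempty subsequences of l in depth-first (lexicographic index) order
def pvSubs : List (String × Int) → List (List (String × Int))
  | [] => []
  | x :: xs => [x] :: ((pvSubs xs).map (x :: ·) ++ pvSubs xs)

theorem pvSubs_ne_nil : ∀ (l : List (String × Int)), ∀ g ∈ pvSubs l, g ≠ [] := by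
  intro l
  induction l with
  | nil => simp [pvSubs]
  | cons x xs ih =>
    simp only [pvSubs, List.mem_cons, List.mem_append, List.mem_map]
    rintro g (rfl | ⟨⟨s, _, rfl⟩ | hg⟩)
    · simp
    · simp
    · exact ih g hg

theorem pvSetLenOne {α : Type} [BEq α] [LawfulBEq α] {l : List α}
    (h : (PySem.Set.ofList l).length = 1) : ∀ a ∈ l, ∀ b ∈ l, a = b := by
  obtain ⟨c, hc⟩ := List.length_eq_one_iff.mp h
  intro a ha b hb
  have ha' := (PySem.Set.mem_ofList l a).mpr ha
  have hb' := (PySem.Set.mem_ofList l b).mpr hb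
  rw [hc] at ha' hb'
  simp at ha' hb'
  rw [ha', hb']

-- a valid group has all-equal numbers or all-equal colors
theorem pvValid_eq_ns_or_cs {g : List (String × Int)} (h : pvValid g = true) :
    (∀ a ∈ g, ∀ b ∈ g, a.2 = b.2) ∨ (∀ a ∈ g, ∀ b ∈ g, a.1 = b.1) := by
  simp only [pvValid] at h
  split at h
  · exact absurd h (by simp)
  · split at h
    · rename_i hcond
      left
      intro a ha b hb
      have h1 : (PySem.Set.ofList (g.map (·.2))).length = 1 := by
        have := (Bool.and_eq_true _ _).mp hcond
        simpa using this.1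
      exact pvSetLenOne h1 _ (List.mem_map_of_mem ha) _ (List.mem_map_of_mem hb)
    · split at h
      · rename_i hcond
        right
        intro a ha b hb
        have h1 : (PySem.Set.ofList (g.map (·.1))).length = 1 := by simpa using hcond
        exact pvSetLenOne h1 _ (List.mem_map_of_mem ha) _ (List.mem_map_of_mem hb)
      · exact absurd h (by simp)

theorem pvNodup_of_ofList_len {α : Type} [DecidableEq α] [BEq α] [LawfulBEq α] {l : List α}
    (h : (PySem.Set.ofList l).length = l.length) : l.Nodup := by
  have hnd := PySem.Set.nodup_ofList l
  have hfin : (PySem.Set.ofList l).toFinset = l.toFinset := by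
    ext a; simp [List.mem_toFinset, PySem.Set.mem_ofList]
  have hcard : l.toFinset.card = l.length := by
    rw [← hfin, List.toFinset_card_of_nodup hnd, h]
  have h2 : l.dedup.length = l.length := by rw [← List.card_toFinset]; exact hcard
  have h3 : l.dedup = l := (List.dedup_sublist l).eq_of_length h2
  exact List.dedup_eq_self.mp h3

-- valid groups have pairwise-distinct tiles
theorem pvValid_nodup {g : List (String × Int)} (h : pvValid g = true) : g.Nodup := by
  simp only [pvValid] at h
  split at h
  · exact absurd h (by simp)
  · split at h
    · rename_i hcond
      have hcol : (PySem.Set.ofList (g.map (·.1))).length = (g.map (·.1)).length := by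
        have := ((Bool.and_eq_true _ _).mp hcond).2
        simpa using this
      exact (pvNodup_of_ofList_len hcol).of_map
    · split at h
      · -- run branch: the sorted numbers are strictly increasing, hence distinct
        have hchain : List.IsChain (fun a b : Int => a + 1 = b)
            (PySem.List.sorted (g.map (·.2)) (fun x => x) false) := by
          set s := PySem.List.sorted (g.map (·.2)) (fun x => x) false with hs
          rw [List.isChain_iff_getElem]
          intro i hi
          have hmem : ((i : Nat) : Int) ∈ PySem.List.pyRange 0 ((s.length : Int) - 1) 1 := by
            rw [PySem.List.mem_pyRange_one]
            constructor <;> [omega; omega]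
          have hall := (List.all_eq_true.mp h) _ hmem
          rw [show ((i : Nat) : Int) + 1 = (((i + 1 : Nat)) : Int) from by push_cast; ring] at hall
          rw [PySem.List.pyGetD_natCast, PySem.List.pyGetD_natCast] at hall
          have heq : s.getD i 0 + 1 = s.getD (i + 1) 0 := by exact_mod_cast beq_iff_eq.mp hall
          rwa [List.getD_eq_getElem s 0 (by omega), List.getD_eq_getElem s 0 hi] at heq
        have hlt : List.IsChain (· < ·) (PySem.List.sorted (g.map (·.2)) (fun x => x) false) :=
          hchain.imp (fun hab => by omega)
        have hnd : (PySem.List.sorted (g.map (·.2)) (fun x => x) false).Nodup :=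
          hlt.pairwise.imp ne_of_lt
        have hperm := PySem.List.sorted_perm (xs := g.map (·.2)) (key := fun x => x) (rev := false)
        exact ((hperm.nodup_iff).mp hnd).of_map
      · exact absurd h (by simp)

theorem pvExtendable_of_valid_append {p q : List (String × Int)}
    (h : pvValid (p ++ q) = true) (hp : p ≠ []) : pvExtendable p = true := by
  have hnd : p.Nodup := (pvValid_nodup h).sublist (List.sublist_append_left p q)
  rw [pvExtendable.eq_def, Bool.and_eq_true]
  refine ⟨?_, by rw [PySem.Set.ofList_eq_self_of_nodup p hnd]; simp⟩
  obtain ⟨⟨c0, n0⟩, p', rfl⟩ : ∃ a p', p = a :: p' := by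
    cases p with
    | nil => exact absurd rfl hp
    | cons a p' => exact ⟨a, p', rfl⟩
  have hhead : ((c0, n0) : String × Int) ∈ (c0, n0) :: p' ++ q := by simp
  rcases pvValid_eq_ns_or_cs h with hn | hc
  · simp only [Bool.or_eq_true, List.all_eq_true]
    left
    intro t ht
    have : t ∈ (c0, n0) :: p' ++ q := by
      simp only [List.cons_append, List.mem_cons, List.mem_append] at ht ⊢
      tauto
    simpa using hn t this _ hhead
  · simp only [Bool.or_eq_true, List.all_eq_true]
    right
    intro t ht
    have : t ∈ (c0, n0) :: p' ++ q := by
      simp only [List.cons_append, List.mem_cons, List.mem_append] at ht ⊢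
      tauto
    simpa using hc t this _ hhead

theorem pvDfs_eq_filterMap : ∀ (rest cur : List (String × Int)),
    pvDfs cur rest = (pvSubs rest).filterMap
      (fun s => if pvValid (cur ++ s) then some (cur ++ s) else none) := by
  intro rest
  induction rest with
  | nil => intro cur; rfl
  | cons x xs ih =>
    intro cur
    simp only [pvDfs, pvSubs, List.filterMap_cons, List.filterMap_append, List.filterMap_map]
    have hmap : (pvSubs xs).filterMap
        ((fun s => if pvValid (cur ++ s) then some (cur ++ s) else none) ∘ (x :: ·)) =
        (pvSubs xs).filterMap
        (fun s => if pvValid ((cur ++ [x]) ++ s) then some ((cur ++ [x]) ++ s) else none) := by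
      apply List.filterMap_congr
      intro s _
      simp [List.append_assoc]
    by_cases hext : pvExtendable (cur ++ [x]) = true
    · rw [hmap, ih (cur ++ [x]), ih cur]
      by_cases hv : pvValid (cur ++ [x]) = true <;> simp [hv, hext]
    · have hnone : (pvSubs xs).filterMap
          (fun s => if pvValid ((cur ++ [x]) ++ s) then some ((cur ++ [x]) ++ s) else none) = [] := by
        apply List.filterMap_eq_nil_iff.mpr
        intro s hs
        have hv : pvValid (cur ++ (x :: s)) = false := by
          rw [Bool.eq_false_iff]
          intro hvt
          refine hext (pvExtendable_of_valid_append (p := cur ++ [x]) (q := s) ?_ (by simp))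
          simpa using hvt
        simp [hv]
      rw [hmap, hnone, ih cur]
      by_cases hv : pvValid (cur ++ [x]) = true <;> simp [hv, hext]

theorem pvFilterIf (p : List (String × Int) → Bool) (l : List (List (String × Int))) :
    l.filter p = l.filterMap (fun a => if p a then some a else none) := by
  induction l with
  | nil => rfl
  | cons x xs ih => by_cases h : p x <;> simp [h, ih]

theorem pvCands_eq (hand : List (String × Int)) :
    pvDfs [] hand = (pvSubs hand).filter pvValid := by
  rw [pvDfs_eq_filterMap, pvFilterIf]
  apply List.filterMap_congr
  intro s _
  simp

theorem pvSubs_filter_len : ∀ (l : List (String × Int)) (k : Nat), 1 ≤ k →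
    (pvSubs l).filter (fun g => g.length == k) = pvComb k l := by
  intro l
  induction l with
  | nil =>
    intro k hk
    match k, hk with
    | k + 1, _ => simp [pvSubs, pvComb]
  | cons x xs ih =>
    intro k hk
    match k, hk with
    | 1, _ =>
      simp only [pvSubs, List.filter_cons, List.filter_append, List.filter_map]
      have h0 : (pvSubs xs).filter ((fun g => g.length == 1) ∘ (x :: ·)) = [] := by
        apply List.filter_eq_nil_iff.mpr
        intro g hg
        have := pvSubs_ne_nil xs g hg
        simp only [Function.comp]
        simp
        intro hlen
        exact absurd hlen this
      rw [h0, ih 1 (by omega)]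
      simp [pvComb]
    | k + 2, _ =>
      simp only [pvSubs, List.filter_cons, List.filter_append, List.filter_map]
      have hmap : (pvSubs xs).filter ((fun g => g.length == k + 2) ∘ (x :: ·)) =
          (pvSubs xs).filter (fun g => g.length == k + 1) := by
        apply List.filter_congr
        intro g _
        simp only [Function.comp]
        simp
      rw [hmap, ih (k + 1) (by omega), ih (k + 2) (by omega)]
      rw [if_neg (by simp : ¬ ([x].length == k + 2) = true)]
      rfl

theorem pvLoop_eq (hand : List (String × Int)) : pvLoopA hand = pvLoopB hand := by
  unfold pvLoopA pvLoopB
  apply PySem.List.foldl_congr_mem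
  intro st size hsize
  have h3 : 3 ≤ size := by
    rw [PySem.List.mem_pyRange_one] at hsize; exact hsize.1
  obtain ⟨k, rfl⟩ := Int.eq_ofNat_of_zero_le (by omega : (0:Int) ≤ size)
  -- A side: pull the validity test out of the loop body
  have ha : (pvComb ((k : Int)).toNat hand).foldl
      (fun st combo =>
        if combo.any (fun t => PySem.Set.contains st.2 t) then st
        else if pvValid combo then (st.1 ++ [combo], PySem.Set.update st.2 combo)
        else st) st =
      ((pvComb k hand).filter pvValid).foldl
      (fun st combo =>
        if combo.any (fun t => PySem.Set.contains st.2 t) then st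
        else (st.1 ++ [combo], PySem.Set.update st.2 combo)) st := by
    rw [Int.toNat_natCast, List.foldl_filter]
    apply PySem.List.foldl_congr_mem
    intro st g _
    cases hv : pvValid g
    · cases hc : g.any (fun t => PySem.Set.contains st.2 t) <;> simp_all
    · cases hc : g.any (fun t => PySem.Set.contains st.2 t) <;> simp_all
  -- B side: split the conjunctive test
  have hb : (pvDfs [] hand).foldl
      (fun st g =>
        if ((g.length : Int) == (k : Int)) && g.all (fun t => !(PySem.Set.contains st.2 t)) then
          (st.1 ++ [g], PySem.Set.update st.2 g)
        else st) st =
      ((pvDfs [] hand).filter (fun g => g.length == k)).foldl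
      (fun st g =>
        if g.any (fun t => PySem.Set.contains st.2 t) then st
        else (st.1 ++ [g], PySem.Set.update st.2 g)) st := by
    rw [List.foldl_filter]
    apply PySem.List.foldl_congr_mem
    intro st g _
    rw [show (g.all fun t => !(PySem.Set.contains st.2 t)) =
        !(g.any fun t => PySem.Set.contains st.2 t) from List.not_any_eq_all_not.symm]
    by_cases hl : g.length = k
    · have hl' : ((g.length : Int) == (k : Int)) = true := by simp [hl]
      have hl'' : (g.length == k) = true := by simp [hl]
      rw [hl', hl'']
      cases hc : g.any fun t => PySem.Set.contains st.2 t <;> simp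
    · have hl' : ((g.length : Int) == (k : Int)) = false := by simp [hl]
      have hl'' : (g.length == k) = false := by simp [hl]
      rw [hl', hl'']
      simp
  rw [ha, hb]
  -- the two filtered candidate lists coincide
  have hlists : (pvDfs [] hand).filter (fun g => g.length == k) =
      (pvComb k hand).filter pvValid := by
    rw [pvCands_eq, List.filter_filter]
    have : (pvSubs hand).filter (fun a => (a.length == k) && pvValid a) =
        (pvSubs hand).filter (fun a => pvValid a && (a.length == k)) := by
      apply List.filter_congr
      intro a _
      exact Bool.and_comm _ _
    rw [this, ← List.filter_filter, pvSubs_filter_len hand k (by omega)]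
  rw [hlists]

-- ===== VERDICT (by name: the statement is the Claim_ definition above) =====
theorem find_initial_groups_from_hand_spec : Claim_equal_find_initial_groups_from_hand := by
  intro hand _
  unfold Spec_find_initial_groups_from_hand
  unfold find_initial_groups_from_hand find_initial_groups_from_hand_alt
  rw [pvLoop_eq]
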